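-- pv_equiv track=rewrite | github.com/AdriannaNiemiec/Praca-Inzynierska | alg_genetyczny.py | binaryToDeci
-- ===== SOURCE A (Python) =====
-- def binaryToDeci(tablica):
--     deci = []
--     tmp_val = 0
--     for j in range(int(len(tablica)/8)):
--         for n in range(7, -1, -1):
--             tmp_val += (tablica[n+(j*8)]*(2**(-n+7)))
--         deci.append(tmp_val)
--         tmp_val=0
--     return deci
-- ===== SOURCE B (Python) =====
-- def binaryToDeci(tablica):
--     # Simpler decomposition: recursively peel off 8-bit chunks from the front
--     # and evaluate each chunk with Horner's rule (val = 2*val + bit).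
--     if len(tablica) < 8:
--         return []
--     val = 0
--     for b in tablica[:8]:
--         val = 2 * val + b
--     return [val] + binaryToDeci(tablica[8:])
-- ===== Notes on version B (the rewrite author's own statement) =====
-- stated objective: simpler
-- what changed: Replaced index arithmetic with powers of two (tablica[n+j*8]*2**(7-n) over a reversed range) by recursion that slices off each 8-bit chunk and evaluates it with Horner's rule val = 2*val + bit.
import Mathlib
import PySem

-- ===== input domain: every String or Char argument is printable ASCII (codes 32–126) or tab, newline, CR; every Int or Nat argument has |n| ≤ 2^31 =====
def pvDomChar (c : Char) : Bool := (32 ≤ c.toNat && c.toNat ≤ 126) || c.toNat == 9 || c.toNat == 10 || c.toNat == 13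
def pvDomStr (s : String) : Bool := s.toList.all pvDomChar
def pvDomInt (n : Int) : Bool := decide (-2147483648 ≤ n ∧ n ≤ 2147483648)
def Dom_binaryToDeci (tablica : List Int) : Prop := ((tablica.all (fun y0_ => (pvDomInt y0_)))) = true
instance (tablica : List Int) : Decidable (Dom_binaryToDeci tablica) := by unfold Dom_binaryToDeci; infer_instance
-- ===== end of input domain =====

-- B replaces A's power-of-two index arithmetic by recursion over 8-bit chunks
-- evaluated with Horner's rule; objective: simpler.


-- ===== PORT A =====
-- inner loop: for n in range(7,-1,-1): tmp_val += tablica[n+j*8] * 2**(-n+7)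
def pvInnerA (tablica : List Int) (j : Nat) : Int :=
  (PySem.List.pyRange 7 (-1) (-1)).foldl
    (fun tmp_val n => tmp_val + (PySem.List.pyGetD tablica (n + (j : Int) * 8) 0) * (2 : Int) ^ ((-n + 7).toNat)) 0

def binaryToDeci (tablica : List Int) : List Int :=
  (List.range (tablica.length / 8)).foldl (fun deci j => deci ++ [pvInnerA tablica j]) []

-- ===== PORT B =====
def pvHorner (bits : List Int) : Int := bits.foldl (fun v b => 2 * v + b) 0

def binaryToDeci_alt (tablica : List Int) : List Int :=
  if tablica.length < 8 then []
  else pvHorner (tablica.take 8) :: binaryToDeci_alt (tablica.drop 8)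
termination_by tablica.length
decreasing_by simp [List.length_drop]; omega

-- ===== PRECONDITION & SPEC =====
def Spec_binaryToDeci (tablica : List Int) (out : List Int) : Prop := out = binaryToDeci_alt tablica
instance (tablica : List Int) (out : List Int) : Decidable (Spec_binaryToDeci tablica out) := by unfold Spec_binaryToDeci; infer_instance

-- ===== CLAIM (what is proved, stated in full; the proofs are below) =====
def Claim_equal_binaryToDeci : Prop := ∀ (tablica : List Int), Dom_binaryToDeci tablica → Spec_binaryToDeci tablica (binaryToDeci tablica)

-- ===== LEMMAS AND PROOFS =====

lemma pv_foldl_append_map {α β : Type} (f : α → β) (l : List α) (acc : List β) :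
    l.foldl (fun d x => d ++ [f x]) acc = acc ++ l.map f := by
  induction l generalizing acc with
  | nil => simp
  | cons x xs ih => simp [List.foldl, ih]

lemma pv_A_eq_map (tablica : List Int) :
    binaryToDeci tablica = (List.range (tablica.length / 8)).map (pvInnerA tablica) := by
  unfold binaryToDeci
  rw [pv_foldl_append_map]
  simp

lemma pv_pyRange_concrete : PySem.List.pyRange 7 (-1) (-1) = [7, 6, 5, 4, 3, 2, 1, 0] := by decide

lemma pv_inner_zero (a b c d e f g h : Int) (rest : List Int) :
    pvInnerA (a :: b :: c :: d :: e :: f :: g :: h :: rest) 0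
      = pvHorner ((a :: b :: c :: d :: e :: f :: g :: h :: rest).take 8) := by
  simp [pvInnerA, pv_pyRange_concrete, pvHorner, List.foldl, PySem.List.pyGetD,
    PySem.List.pyGet?, PySem.List.pyIdx?]
  split_ifs <;> first | (exfalso; omega) | (simp; ring)

lemma pv_inner_succ (a b c d e f g h : Int) (rest : List Int) (j : Nat) :
    pvInnerA (a :: b :: c :: d :: e :: f :: g :: h :: rest) (j + 1) = pvInnerA rest j := by
  simp only [pvInnerA, pv_pyRange_concrete, List.foldl]
  have key : ∀ (n : Int), 0 ≤ n →
      PySem.List.pyGetD (a :: b :: c :: d :: e :: f :: g :: h :: rest) (n + ((j : Nat) + 1 : Nat) * 8) 0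
        = PySem.List.pyGetD rest (n + (j : Int) * 8) 0 := by
    intro n hn
    have h1 : (n + ((j : Nat) + 1 : Nat) * 8 : Int) = ((n + (j : Int) * 8) + 8) := by push_cast; ring
    rw [h1]
    have h2 : (0 : Int) ≤ n + (j : Int) * 8 := by positivity
    rcases Int.eq_ofNat_of_zero_le h2 with ⟨m, hm⟩
    rw [hm]
    have h3 : ((m : Int) + 8) = ((m + 8 : Nat) : Int) := by push_cast; ring
    rw [h3, PySem.List.pyGetD_natCast]
    simp [List.getD]
  rw [key 7 (by norm_num), key 6 (by norm_num), key 5 (by norm_num), key 4 (by norm_num),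
    key 3 (by norm_num), key 2 (by norm_num), key 1 (by norm_num), key 0 (by norm_num)]

lemma pv_main (tablica : List Int) : binaryToDeci tablica = binaryToDeci_alt tablica := by
  rw [pv_A_eq_map]
  induction hn : tablica.length / 8 generalizing tablica with
  | zero =>
    rw [binaryToDeci_alt]
    have : tablica.length < 8 := by omega
    simp [this]
  | succ q ih =>
    have hlen : 8 ≤ tablica.length := by
      by_contra h
      have : tablica.length / 8 = 0 := by omega
      omega
    obtain ⟨a, b, c, d, e, f, g, h, rest, rfl⟩ :
        ∃ a b c d e f g h rest, tablica = a :: b :: c :: d :: e :: f :: g :: h :: rest := by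
      match tablica, hlen with
      | a :: b :: c :: d :: e :: f :: g :: h :: rest, _ =>
        exact ⟨a, b, c, d, e, f, g, h, rest, rfl⟩
    rw [binaryToDeci_alt]
    have hlt : ¬ ((a :: b :: c :: d :: e :: f :: g :: h :: rest).length < 8) := by
      simp
    simp only [hlt, if_false]
    rw [List.range_succ_eq_map, List.map_cons, List.map_map, pv_inner_zero]
    have hrest : rest.length / 8 = q := by
      have hl : (a :: b :: c :: d :: e :: f :: g :: h :: rest).length = rest.length + 8 := by simp
      omega
    congr 1
    have hdrop : (a :: b :: c :: d :: e :: f :: g :: h :: rest).drop 8 = rest := rfl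
    rw [hdrop, ← ih rest hrest]
    apply List.map_congr_left
    intro j _
    simp only [Function.comp_apply, Nat.succ_eq_add_one]
    exact pv_inner_succ a b c d e f g h rest j

-- ===== VERDICT (by name: the statement is the Claim_ definition above) =====
theorem binaryToDeci_spec : Claim_equal_binaryToDeci := by
  intro tablica _
  unfold Spec_binaryToDeci
  exact pv_main tablica
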